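-- pv_equiv track=rewrite | github.com/Azurami/pfg-nmr-refinment-tools-lib | refinment/processing/data_reading.py | form_peak_list
-- ===== SOURCE A (Python) =====
-- def form_peak_list(peak_borders):
--     peak_number = len(peak_borders)
--
--     First_point = []
--     Last_point = []
--
--     peaks = []
--
--     area_number = 0;
--
--     for i in range(0, peak_number):
--         for j in range(i + 1, peak_number):
--             if abs(i - j) == 1:
--                 area_number = area_number + 1
--                 peaks.append((peak_borders[i], peak_borders[j]))
--                 First_point.append(peak_borders[i])
--                 Last_point.append(peak_borders[j])
--
--     for i in range(0, peak_number - 1):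
--         for j in range(i + 1, peak_number):
--             if abs(i - j) != 1:
--                 area_number = area_number + 1
--                 peaks.append((peak_borders[i], peak_borders[j]))
--                 First_point.append(peak_borders[i])
--                 Last_point.append(peak_borders[j])
--     return peaks
-- ===== SOURCE B (Python) =====
-- def form_peak_list(peak_borders):
--     consecutive = list(zip(peak_borders, peak_borders[1:]))
--     others = [(head, y)
--               for k, head in enumerate(peak_borders)
--               for y in peak_borders[k + 2:]]
--     return consecutive + others
-- ===== Notes on version B (the rewrite author's own statement) =====
-- stated objective: simpler
-- what changed: Replaces A's two filtered O(n^2) index-pair scans by zip(xs, xs[1:]) for the consecutive pairs and an enumerate-with-slice comprehension (xs[k+2:]) for the remaining pairs, so no abs(i-j) filter test and no per-element indexing remains.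
import Mathlib
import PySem

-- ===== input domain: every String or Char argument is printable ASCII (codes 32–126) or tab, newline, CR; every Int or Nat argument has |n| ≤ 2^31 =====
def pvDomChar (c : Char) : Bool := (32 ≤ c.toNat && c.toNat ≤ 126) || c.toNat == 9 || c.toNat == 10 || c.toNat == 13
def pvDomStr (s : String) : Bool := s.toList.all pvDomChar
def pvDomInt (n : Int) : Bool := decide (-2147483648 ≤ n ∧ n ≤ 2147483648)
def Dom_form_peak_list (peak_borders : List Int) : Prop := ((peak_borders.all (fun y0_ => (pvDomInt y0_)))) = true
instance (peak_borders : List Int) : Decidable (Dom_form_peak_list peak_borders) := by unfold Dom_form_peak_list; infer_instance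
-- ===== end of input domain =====

-- B builds the consecutive pairs with zip(xs, xs[1:]) and the remaining pairs with an
-- enumerate-and-slice comprehension over xs[k+2:], removing A's two filtered index-pair scans
-- (objective: simpler). A's unused accumulators First_point, Last_point, area_number do not
-- affect the return value and are omitted.

-- ===== PORT A =====
def form_peak_list (peak_borders : List Int) : List (Int × Int) :=
  -- peak_number = len(peak_borders); the second double loop starts from the peaks accumulated
  -- by the first double loop ('if abs(i-j) == 1'); the second one tests 'if abs(i-j) != 1'.
  (PySem.List.pyRange 0 ((peak_borders.length : Int) - 1) 1).foldl (fun acc i =>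
    (PySem.List.pyRange (i + 1) (peak_borders.length : Int) 1).foldl (fun acc j =>
      if !((i - j).natAbs == 1) then
        acc ++ [(PySem.List.pyGetD peak_borders i 0, PySem.List.pyGetD peak_borders j 0)]
      else acc) acc)
    ((PySem.List.pyRange 0 (peak_borders.length : Int) 1).foldl (fun acc i =>
      (PySem.List.pyRange (i + 1) (peak_borders.length : Int) 1).foldl (fun acc j =>
        if (i - j).natAbs == 1 then
          acc ++ [(PySem.List.pyGetD peak_borders i 0, PySem.List.pyGetD peak_borders j 0)]
        else acc) acc) [])

-- ===== PORT B =====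
def form_peak_list_alt (peak_borders : List Int) : List (Int × Int) :=
  -- consecutive = list(zip(peak_borders, peak_borders[1:]))
  -- others = [(head, y) for k, head in enumerate(peak_borders) for y in peak_borders[k+2:]]
  (peak_borders.zip (PySem.List.slice peak_borders (some 1) none))
  ++ (PySem.List.enumerate peak_borders 0).flatMap (fun p =>
      (PySem.List.slice peak_borders (some (p.1 + 2)) none).map (fun y => (p.2, y)))

-- ===== PRECONDITION & SPEC =====
def Spec_form_peak_list (peak_borders : List Int) (out : List (Int × Int)) : Prop := out = form_peak_list_alt peak_borders
instance (peak_borders : List Int) (out : List (Int × Int)) : Decidable (Spec_form_peak_list peak_borders out) := by unfold Spec_form_peak_list; infer_instance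

-- ===== CLAIM (what is proved, stated in full; the proofs are below) =====
def Claim_equal_form_peak_list : Prop := ∀ (peak_borders : List Int), Dom_form_peak_list peak_borders → Spec_form_peak_list peak_borders (form_peak_list peak_borders)

-- ===== LEMMAS AND PROOFS =====

-- the filter of A's first inner loop keeps exactly j = i+1 (when it is in range)
lemma filter_eq_one (i n : Int) :
    (PySem.List.pyRange (i + 1) n 1).filter (fun j => (i - j).natAbs == 1)
      = if i + 1 < n then [i + 1] else [] := by
  split_ifs with h
  · rw [PySem.List.pyRange_one_cons h]
    have h2 : (PySem.List.pyRange (i + 1 + 1) n 1).filter (fun j => (i - j).natAbs == 1) = [] := by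
      refine List.filter_eq_nil_iff.mpr ?_
      intro j hj
      rw [PySem.List.mem_pyRange_one] at hj
      simp only [beq_eq_false_iff_ne, ne_eq, Bool.not_eq_true]
      omega
    simp [h2]
  · rw [PySem.List.pyRange_one_eq_nil (by omega)]
    rfl

-- the filter of A's second inner loop is exactly the range starting at i+2
lemma filter_ne_one (i n : Int) :
    (PySem.List.pyRange (i + 1) n 1).filter (fun j => !((i - j).natAbs == 1))
      = PySem.List.pyRange (i + 2) n 1 := by
  by_cases h : i + 1 < n
  · rw [PySem.List.pyRange_one_cons h]
    have h2 : (PySem.List.pyRange (i + 1 + 1) n 1).filter (fun j => !((i - j).natAbs == 1))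
        = PySem.List.pyRange (i + 1 + 1) n 1 := by
      refine List.filter_eq_self.mpr ?_
      intro j hj
      rw [PySem.List.mem_pyRange_one] at hj
      simp only [Bool.not_eq_eq_eq_not, Bool.not_true, beq_eq_false_iff_ne, ne_eq]
      omega
    have h3 : i + 1 + 1 = i + 2 := by ring
    simp [h3]
    intro a ha hb
    omega
  · rw [PySem.List.pyRange_one_eq_nil (b := n) (by omega),
        PySem.List.pyRange_one_eq_nil (b := n) (by omega)]
    rfl

-- flatMap of a pointwise-singleton function is a map
lemma flatMap_eq_map_of {α β : Type} (g : α → List β) (f : α → β) (l : List α)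
    (h : ∀ x ∈ l, g x = [f x]) : l.flatMap g = l.map f := by
  induction l with
  | nil => rfl
  | cons x xs ih =>
      simp only [List.flatMap_cons, List.map_cons, h x (List.mem_cons_self),
        ih (fun y hy => h y (List.mem_cons_of_mem _ hy))]
      rfl

-- A's first double loop produces exactly consecutive index pairs, as a map
lemma loop1_eq (xs : List Int) :
    (PySem.List.pyRange 0 (xs.length : Int) 1).foldl (fun acc i =>
      (PySem.List.pyRange (i + 1) (xs.length : Int) 1).foldl (fun acc j =>
        if (i - j).natAbs == 1 then
          acc ++ [(PySem.List.pyGetD xs i 0, PySem.List.pyGetD xs j 0)]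
        else acc) acc) []
    = (PySem.List.pyRange 0 ((xs.length : Int) - 1) 1).map (fun i =>
        (PySem.List.pyGetD xs i 0, PySem.List.pyGetD xs (i + 1) 0)) := by
  set n : Int := (xs.length : Int) with hn
  have houter :
      (PySem.List.pyRange 0 n 1).foldl (fun acc i =>
        (PySem.List.pyRange (i + 1) n 1).foldl (fun acc j =>
          if (i - j).natAbs == 1 then
            acc ++ [(PySem.List.pyGetD xs i 0, PySem.List.pyGetD xs j 0)]
          else acc) acc) []
      = (PySem.List.pyRange 0 n 1).foldl (fun acc i =>
          acc ++ (((PySem.List.pyRange (i + 1) n 1).filter (fun j => (i - j).natAbs == 1)).map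
            (fun j => (PySem.List.pyGetD xs i 0, PySem.List.pyGetD xs j 0)))) [] := by
    refine PySem.List.foldl_congr_mem _ _ _ _ ?_
    intro acc i _
    exact PySem.List.foldl_append_if _ _ _ _
  rw [houter, PySem.List.foldl_append_eq_flatMap, List.nil_append]
  by_cases hpos : 1 ≤ n
  · rw [PySem.List.pyRange_one_append 0 (n - 1) n (by omega) (by omega), List.flatMap_append]
    have hlast : PySem.List.pyRange (n - 1) n 1 = [n - 1] := by
      have := PySem.List.pyRange_one_singleton (a := n - 1)
      simpa using this
    rw [hlast]
    have hend : ((PySem.List.pyRange (n - 1 + 1) n 1).filter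
        (fun j => ((n - 1) - j).natAbs == 1)) = [] := by
      rw [filter_eq_one]; simp
    simp only [List.flatMap_cons, List.flatMap_nil, hend, List.map_nil, List.append_nil]
    refine flatMap_eq_map_of _ _ _ ?_
    intro i hi
    rw [PySem.List.mem_pyRange_one] at hi
    rw [filter_eq_one, if_pos (by omega)]
    rfl
  · rw [PySem.List.pyRange_one_eq_nil (a := 0) (b := n) (by omega),
        PySem.List.pyRange_one_eq_nil (a := 0) (b := n - 1) (by omega)]
    rfl

-- A's second double loop (from any accumulator) is the flatMap over non-adjacent index pairs
lemma loop2_eq (xs : List Int) (init : List (Int × Int)) :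
    (PySem.List.pyRange 0 ((xs.length : Int) - 1) 1).foldl (fun acc i =>
      (PySem.List.pyRange (i + 1) (xs.length : Int) 1).foldl (fun acc j =>
        if !((i - j).natAbs == 1) then
          acc ++ [(PySem.List.pyGetD xs i 0, PySem.List.pyGetD xs j 0)]
        else acc) acc) init
    = init ++ (PySem.List.pyRange 0 (xs.length : Int) 1).flatMap (fun i =>
        (PySem.List.pyRange (i + 2) (xs.length : Int) 1).map
          (fun j => (PySem.List.pyGetD xs i 0, PySem.List.pyGetD xs j 0))) := by
  set n : Int := (xs.length : Int) with hn
  have h1 : (PySem.List.pyRange 0 (n - 1) 1).foldl (fun acc i =>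
      (PySem.List.pyRange (i + 1) n 1).foldl (fun acc j =>
        if !((i - j).natAbs == 1) then
          acc ++ [(PySem.List.pyGetD xs i 0, PySem.List.pyGetD xs j 0)]
        else acc) acc) init
      = (PySem.List.pyRange 0 (n - 1) 1).foldl (fun acc i =>
          acc ++ ((PySem.List.pyRange (i + 2) n 1).map
            (fun j => (PySem.List.pyGetD xs i 0, PySem.List.pyGetD xs j 0)))) init := by
    refine PySem.List.foldl_congr_mem _ _ _ _ ?_
    intro acc i _
    rw [PySem.List.foldl_append_if (fun j => !((i - j).natAbs == 1)) _ _ _, filter_ne_one]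
  rw [h1, PySem.List.foldl_append_eq_flatMap]
  congr 1
  by_cases hpos : 1 ≤ n
  · rw [PySem.List.pyRange_one_append 0 (n - 1) n (by omega) (by omega), List.flatMap_append]
    have hlast : PySem.List.pyRange (n - 1) n 1 = [n - 1] := by
      have := PySem.List.pyRange_one_singleton (a := n - 1)
      simpa using this
    rw [hlast]
    have hnil : PySem.List.pyRange (n - 1 + 2) n 1 = [] :=
      PySem.List.pyRange_one_eq_nil (by omega)
    simp [hnil]
  · rw [PySem.List.pyRange_one_eq_nil (a := 0) (b := n) (by omega),
        PySem.List.pyRange_one_eq_nil (a := 0) (b := n - 1) (by omega)]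

-- the consecutive index map is B's zip of the list with its tail-slice
lemma consec_eq_zip (xs : List Int) :
    (PySem.List.pyRange 0 ((xs.length : Int) - 1) 1).map (fun i =>
        (PySem.List.pyGetD xs i 0, PySem.List.pyGetD xs (i + 1) 0))
    = xs.zip (PySem.List.slice xs (some 1) none) := by
  rw [PySem.List.slice_from_one]
  apply List.ext_getElem
  · simp [PySem.List.length_pyRange_one]
  · intro k hk1 hk2
    have hklt : k + 1 < xs.length := by
      simp [PySem.List.length_pyRange_one] at hk1
      omega
    have hi : (PySem.List.pyRange 0 ((xs.length : Int) - 1) 1)[k]'(by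
        simp [PySem.List.length_pyRange_one]; omega) = (k : Int) := by
      rw [PySem.List.getElem_pyRange_one]; omega
    simp only [List.getElem_map, hi, List.getElem_zip, List.getElem_tail]
    have e1 : PySem.List.pyGetD xs (k : Int) 0 = xs[k]'(by omega) := by
      rw [PySem.List.pyGetD_eq_getElem xs 0 (by omega) (by omega)]
      simp
    have e2 : PySem.List.pyGetD xs ((k : Int) + 1) 0 = xs[k + 1]'hklt := by
      rw [PySem.List.pyGetD_eq_getElem xs 0 (by omega) (by omega)]
      have ht : ((k : Int) + 1).toNat = k + 1 := by omega
      simp [ht]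
    rw [e1, e2]

-- the non-adjacent flatMap over index pairs is B's enumerate-with-slice comprehension
lemma others_eq_enum (xs : List Int) :
    (PySem.List.pyRange 0 (xs.length : Int) 1).flatMap (fun i =>
        (PySem.List.pyRange (i + 2) (xs.length : Int) 1).map
          (fun j => (PySem.List.pyGetD xs i 0, PySem.List.pyGetD xs j 0)))
    = (PySem.List.enumerate xs 0).flatMap (fun p =>
        (PySem.List.slice xs (some (p.1 + 2)) none).map (fun y => (p.2, y))) := by
  rw [PySem.List.enumerate_eq_map_pyRange (d := 0), List.flatMap_map]
  apply List.flatMap_congr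
  intro i hi
  rw [PySem.List.mem_pyRange_one] at hi
  have hslice : PySem.List.slice xs (some (i + 2)) none = xs.drop (i + 2).toNat :=
    PySem.List.slice_from xs (by omega)
  have hmap : (PySem.List.pyRange (i + 2) (xs.length : Int) 1).map
      (fun j => PySem.List.pyGetD xs j 0) = xs.drop (i + 2).toNat :=
    PySem.List.map_pyGetD_pyRange' xs 0 (a := i + 2) (by omega)
  simp only [hslice, ← hmap, List.map_map]
  rfl

-- ===== VERDICT (by name: the statement is the Claim_ definition above) =====
theorem form_peak_list_spec : Claim_equal_form_peak_list := by
  intro xs _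
  show form_peak_list xs = form_peak_list_alt xs
  unfold form_peak_list form_peak_list_alt
  rw [loop2_eq xs, loop1_eq xs, consec_eq_zip, others_eq_enum]
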